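-- pv_equiv track=rewrite | github.com/Chevalier1024/Chinese-Medicine-QG | QG_data_loader.py | get_answer_encoding
-- ===== SOURCE A (Python) =====
-- def get_answer_encoding(text, answer):
--     start = None
--     for index in range(len(text) - len(answer) + 1):
--         if text[index:index+len(answer)] == answer:
--             start = index
--             break
--     answer_encoding = [0] * len(text)
--     if start is not None:
--         answer_encoding[start:start+len(answer)] = [1] * len(answer)
--     return answer_encoding
-- ===== SOURCE B (Python) =====
-- def get_answer_encoding(text, answer):
--     # Rabin-Karp: one pass with a rolling polynomial hash; compare the window
--     # slice only when the hashes agree, so a full slice comparison happens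
--     # rarely instead of at every index.
--     n, m = len(text), len(answer)
--     if m == 0 or m > n:
--         return [0] * n
--     B = 1000003
--     MOD = (1 << 61) - 1
--     ha = 0
--     for c in answer:
--         ha = (ha * B + ord(c)) % MOD
--     h = 0
--     for c in text[:m]:
--         h = (h * B + ord(c)) % MOD
--     pw = pow(B, m - 1, MOD)
--     start = None
--     for i in range(n - m + 1):
--         if h == ha and text[i:i+m] == answer:
--             start = i
--             break
--         if i + m < n:
--             h = ((h - ord(text[i]) * pw) * B + ord(text[i+m])) % MOD
--     if start is None:
--         return [0] * n
--     return [0] * start + [1] * m + [0] * (n - start - m)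
-- ===== Notes on version B (the rewrite author's own statement) =====
-- stated objective: alternative
-- what changed: Replaces A's per-index trial slice comparison by a Rabin-Karp scan: a rolling polynomial hash (base 1000003, mod 2^61-1) is updated once per position and the window slice is compared with the answer only when the hashes agree.
import Mathlib
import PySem

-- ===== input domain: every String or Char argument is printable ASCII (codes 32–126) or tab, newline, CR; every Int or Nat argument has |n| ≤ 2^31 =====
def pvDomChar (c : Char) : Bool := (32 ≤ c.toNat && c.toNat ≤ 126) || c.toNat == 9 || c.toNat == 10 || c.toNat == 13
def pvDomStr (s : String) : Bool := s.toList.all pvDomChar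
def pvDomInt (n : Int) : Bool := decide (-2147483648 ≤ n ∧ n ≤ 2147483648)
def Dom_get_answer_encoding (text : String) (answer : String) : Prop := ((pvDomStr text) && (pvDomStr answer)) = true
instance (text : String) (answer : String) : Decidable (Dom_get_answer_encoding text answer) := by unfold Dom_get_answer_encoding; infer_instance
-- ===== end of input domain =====

-- B replaces A's trial-slice comparison at every candidate index by a Rabin-Karp rolling-hash
-- scan: the window slice is compared with the answer only when the hashes agree (alternative algorithm).

-- ===== PORT A =====
-- literal port of A: scan range(len(text)-len(answer)+1) for the first index whose slice equals answer
-- ('break' = Option accumulator that never changes once set), then [0]*len(text) with the slice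
-- assignment enc[start:start+la] = [1]*la rendered exactly as take(clamp start) ++ [1]*la ++ drop(clamp (start+la)).
def get_answer_encoding (text : String) (answer : String) : List Int :=
  let t := text.toList
  let a := answer.toList
  let start : Option Int :=
    (PySem.List.pyRange 0 ((t.length : Int) - (a.length : Int) + 1) 1).foldl
      (fun st index =>
        match st with
        | some _ => st
        | none =>
          if PySem.List.slice t (some index) (some (index + (a.length : Int))) = a then some index
          else none) none
  let enc : List Int := List.replicate t.length 0
  match start with
  | none => enc
  | some s =>
      enc.take (PySem.List.clampIdx enc.length s) ++ List.replicate a.length 1 ++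
        enc.drop (PySem.List.clampIdx enc.length (s + (a.length : Int)))

-- ===== PORT B ===== (Source B: Rabin-Karp, modulus 2^61-1, base 1000003)
def pvRKM : Int := 2305843009213693951

-- one hashing step: h = (h * B + ord(c)) % MOD
def pvRKStep (h : Int) (c : Char) : Int :=
  PySem.Int.mod (h * 1000003 + (c.toNat : Int)) pvRKM

-- the `for i in range(n-m+1)` loop with break and rolling update, as recursion on i
-- (t.getD is exact here: the indices i and i+m are only read when i+m < n = len(t))
def pvRKLoop (t a : List Char) (ha pw : Int) (n m : Nat) (i : Nat) (h : Int) : Option Nat :=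
  if _hstop : n < i + m then none
  else if h = ha ∧ PySem.List.slice t (some (i : Int)) (some ((i : Int) + (m : Int))) = a then
    some i
  else
    let h' := if i + m < n then
        PySem.Int.mod ((h - ((t.getD i default).toNat : Int) * pw) * 1000003
          + ((t.getD (i + m) default).toNat : Int)) pvRKM
      else h
    pvRKLoop t a ha pw n m (i + 1) h'
termination_by n + 1 - i
decreasing_by omega

def get_answer_encoding_alt (text : String) (answer : String) : List Int :=
  let t := text.toList
  let a := answer.toList
  let n := t.length
  let m := a.length
  if m = 0 ∨ n < m then List.replicate n 0
  else
    let ha := a.foldl pvRKStep 0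
    let h := (PySem.List.slice t none (some (m : Int))).foldl pvRKStep 0
    let pw := PySem.Int.powMod 1000003 (m - 1) pvRKM
    match pvRKLoop t a ha pw n m 0 h with
    | none => List.replicate n 0
    | some s => List.replicate s 0 ++ List.replicate m 1 ++ List.replicate (n - s - m) 0

-- ===== PRECONDITION & SPEC =====
def Spec_get_answer_encoding (text : String) (answer : String) (out : List Int) : Prop := out = get_answer_encoding_alt text answer
instance (text : String) (answer : String) (out : List Int) : Decidable (Spec_get_answer_encoding text answer out) := by unfold Spec_get_answer_encoding; infer_instance

-- ===== CLAIM (what is proved, stated in full; the proofs are below) =====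
def Claim_equal_get_answer_encoding : Prop := ∀ (text : String) (answer : String), Dom_get_answer_encoding text answer → Spec_get_answer_encoding text answer (get_answer_encoding text answer)

-- ===== LEMMAS AND PROOFS =====

-- proof-side reference: the first index j ≥ i with j+m ≤ n whose window equals a
def pvNaive (t a : List Char) (m n : Nat) (i : Nat) : Option Nat :=
  if _h : n < i + m then none
  else if (t.drop i).take m = a then some i
  else pvNaive t a m n (i + 1)
termination_by n + 1 - i
decreasing_by omega

-- the unmodded polynomial hash step
def pvPStep (h : Int) (c : Char) : Int := h * 1000003 + (c.toNat : Int)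

theorem pvRKStep_eq (h : Int) (c : Char) :
    pvRKStep h c = (h * 1000003 + (c.toNat : Int)) % pvRKM := by
  rw [pvRKStep, PySem.Int.mod_eq_emod_of_pos (by norm_num [pvRKM])]

theorem pvStepCongr (h c : Int) : ((h % pvRKM) * 1000003 + c) % pvRKM = (h * 1000003 + c) % pvRKM := by
  have hh : (h % pvRKM) ≡ h [ZMOD pvRKM] := Int.emod_emod_of_dvd h dvd_rfl
  exact (hh.mul_right 1000003).add_right c

theorem pvFoldStep (l : List Char) : ∀ (h : Int),
    l.foldl pvRKStep (h % pvRKM) = (l.foldl pvPStep h) % pvRKM := by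
  induction l with
  | nil => intro h; rfl
  | cons c l ih =>
      intro h
      simp only [List.foldl_cons, pvRKStep_eq, pvPStep, pvStepCongr]
      exact ih (h * 1000003 + c.toNat)

theorem pvFoldStep0 (l : List Char) : l.foldl pvRKStep 0 = (l.foldl pvPStep 0) % pvRKM := by
  have := pvFoldStep l 0; simpa using this

theorem pvP_shift (l : List Char) : ∀ (h : Int),
    l.foldl pvPStep h = h * 1000003 ^ l.length + l.foldl pvPStep 0 := by
  induction l with
  | nil => intro h; simp
  | cons c l ih =>
      intro h
      simp only [List.foldl_cons, List.length_cons]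
      rw [ih (pvPStep h c), ih (pvPStep 0 c), pvPStep, pvPStep]
      ring

-- the rolling update: from the hash of window c::w to the hash of window w++[d]
theorem pvRoll (c d : Char) (w : List Char) :
    ((((c :: w).foldl pvRKStep 0) - (c.toNat : Int) * ((1000003 ^ w.length : Int) % pvRKM)) * 1000003
      + (d.toNat : Int)) % pvRKM
    = (w ++ [d]).foldl pvRKStep 0 := by
  rw [pvFoldStep0, pvFoldStep0]
  have hP1 : (c :: w).foldl pvPStep 0 = (c.toNat : Int) * 1000003 ^ w.length + w.foldl pvPStep 0 := by
    simp only [List.foldl_cons]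
    rw [pvP_shift w (pvPStep 0 c), pvPStep]; ring
  have hP2 : (w ++ [d]).foldl pvPStep 0 = (w.foldl pvPStep 0) * 1000003 + (d.toNat : Int) := by
    rw [List.foldl_append]; rfl
  rw [hP1, hP2]
  have hX : ((c.toNat : Int) * 1000003 ^ w.length + w.foldl pvPStep 0) % pvRKM
      ≡ (c.toNat : Int) * 1000003 ^ w.length + w.foldl pvPStep 0 [ZMOD pvRKM] :=
    Int.emod_emod_of_dvd _ dvd_rfl
  have hY : ((1000003 ^ w.length : Int) % pvRKM) ≡ (1000003 ^ w.length : Int) [ZMOD pvRKM] :=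
    Int.emod_emod_of_dvd _ dvd_rfl
  have hZ := ((hX.sub (hY.mul_left (c.toNat : Int))).mul_right 1000003).add_right (d.toNat : Int)
  calc ((((c.toNat : Int) * 1000003 ^ w.length + w.foldl pvPStep 0) % pvRKM
          - (c.toNat : Int) * ((1000003 ^ w.length : Int) % pvRKM)) * 1000003 + (d.toNat : Int)) % pvRKM
      = ((((c.toNat : Int) * 1000003 ^ w.length + w.foldl pvPStep 0)
          - (c.toNat : Int) * (1000003 ^ w.length : Int)) * 1000003 + (d.toNat : Int)) % pvRKM := hZ
    _ = ((w.foldl pvPStep 0) * 1000003 + (d.toNat : Int)) % pvRKM := by ring_nf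

-- the break-style fold stays `some x` forever
theorem pvFoldSome {p : Int → Prop} [DecidablePred p] (l : List Int) (x : Int) :
    l.foldl (fun st index => match st with
      | some _ => st
      | none => if p index then some index else none) (some x) = some x := by
  induction l with
  | nil => rfl
  | cons i l ih => simpa using ih

-- A's loop from j equals pvNaive from j (fuel-indexed induction)
theorem pvFoldA (t a : List Char) :
    ∀ (k j : Nat), t.length + 1 - j ≤ k →
    (PySem.List.pyRange (j : Int) ((t.length : Int) - (a.length : Int) + 1) 1).foldl
      (fun st index => match st with
        | some _ => st
        | none =>
          if PySem.List.slice t (some index) (some (index + (a.length : Int))) = a then some index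
          else none) none
    = (pvNaive t a a.length t.length j).map Int.ofNat := by
  intro k
  induction k with
  | zero =>
      intro j hk
      rw [PySem.List.pyRange_one_eq_nil (by omega)]
      rw [pvNaive]
      rw [dif_pos (by omega)]
      rfl
  | succ k ih =>
      intro j hk
      by_cases hend : t.length < j + a.length
      · rw [PySem.List.pyRange_one_eq_nil (by omega)]
        rw [pvNaive, dif_pos (by omega)]
        rfl
      · rw [PySem.List.pyRange_one_cons (by omega), List.foldl_cons]
        rw [pvNaive, dif_neg (by omega)]
        by_cases hwin : (t.drop j).take a.length = a
        · rw [if_pos (by rw [PySem.List.slice_natCast_add]; exact hwin), pvFoldSome, if_pos hwin]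
          rfl
        · rw [if_neg (by rw [PySem.List.slice_natCast_add]; exact hwin), if_neg hwin]
          have : (j : Int) + 1 = ((j + 1 : Nat) : Int) := by push_cast; ring
          rw [this]
          exact ih (j + 1) (by omega)

-- pvNaive's answer fits: the window lies inside t
theorem pvNaive_le (t a : List Char) (m n : Nat) :
    ∀ (k i s : Nat), n + 1 - i ≤ k → pvNaive t a m n i = some s → s + m ≤ n := by
  intro k
  induction k with
  | zero =>
      intro i s hk hs
      rw [pvNaive, dif_pos (by omega)] at hs
      exact absurd hs (by simp)
  | succ k ih =>
      intro i s hk hs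
      by_cases hend : n < i + m
      · rw [pvNaive, dif_pos hend] at hs; exact absurd hs (by simp)
      · rw [pvNaive, dif_neg hend] at hs
        by_cases hwin : (t.drop i).take m = a
        · rw [if_pos hwin] at hs
          cases hs
          omega
        · rw [if_neg hwin] at hs
          exact ih (i + 1) s (by omega) hs

-- rolling-hash invariant: pvRKLoop from i with the hash of window i equals pvNaive from i
theorem pvRKLoop_eq_naive (t a : List Char) (hm : 1 ≤ a.length) :
    ∀ (k i : Nat) (h : Int), t.length + 1 - i ≤ k →
    h = ((t.drop i).take a.length).foldl pvRKStep 0 →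
    pvRKLoop t a (a.foldl pvRKStep 0) (PySem.Int.powMod 1000003 (a.length - 1) pvRKM)
      t.length a.length i h
    = pvNaive t a a.length t.length i := by
  intro k
  induction k with
  | zero =>
      intro i h hk hinv
      rw [pvRKLoop, dif_pos (by omega), pvNaive, dif_pos (by omega)]
  | succ k ih =>
      intro i h hk hinv
      by_cases hend : t.length < i + a.length
      · rw [pvRKLoop, dif_pos hend, pvNaive, dif_pos hend]
      · rw [pvRKLoop, dif_neg hend, pvNaive, dif_neg hend]
        by_cases hwin : (t.drop i).take a.length = a
        · rw [if_pos ⟨by rw [hinv, hwin], by rw [PySem.List.slice_natCast_add]; exact hwin⟩,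
            if_pos hwin]
        · rw [if_neg (fun hc => hwin (by rw [← PySem.List.slice_natCast_add]; exact hc.2)),
            if_neg hwin]
          by_cases hroll : i + a.length < t.length
          · -- rolling update keeps the invariant
            rw [if_pos hroll]
            apply ih (i + 1) _ (by omega)
            obtain ⟨m', hm'⟩ : ∃ m', a.length = m' + 1 := ⟨a.length - 1, by omega⟩
            have hi : i < t.length := by omega
            have hdrop : t.drop i = t[i] :: t.drop (i + 1) := List.drop_eq_getElem_cons hi
            have hwlen : ((t.drop (i + 1)).take m').length = m' := by
              rw [List.length_take, List.length_drop]; omega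
            have hw1 : (t.drop i).take a.length = t[i] :: (t.drop (i + 1)).take m' := by
              rw [hdrop, hm', List.take_succ_cons]
            have hgd : (t.drop (i + 1))[m']? = some t[i + 1 + m'] := by
              rw [List.getElem?_drop, List.getElem?_eq_getElem (by omega)]
            have hw2 : (t.drop (i + 1)).take a.length
                = (t.drop (i + 1)).take m' ++ [t[i + 1 + m']] := by
              conv_lhs => rw [hm']
              rw [List.take_add_one, hgd]
              rfl
            rw [hw2]
            have hpw : PySem.Int.powMod 1000003 (a.length - 1) pvRKM
                = (1000003 ^ m' : Int) % pvRKM := by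
              rw [PySem.Int.powMod_eq, PySem.Int.mod_eq_emod_of_pos (by norm_num [pvRKM]), hm']
              norm_num
            have hg1 : t.getD i default = t[i] := List.getD_eq_getElem t default hi
            have hg2 : t.getD (i + a.length) default = t[i + 1 + m'] := by
              rw [show i + a.length = i + 1 + m' from by omega]
              exact List.getD_eq_getElem t default (by omega)
            rw [PySem.Int.mod_eq_emod_of_pos (by norm_num [pvRKM]), hpw, hg1, hg2, hinv, hw1]
            have hr := pvRoll t[i] t[i + 1 + m'] ((t.drop (i + 1)).take m')
            rw [hwlen] at hr
            exact hr
          · -- last iteration: both sides finish with none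
            rw [if_neg hroll]
            rw [pvRKLoop, dif_pos (by omega), pvNaive, dif_pos (by omega)]

theorem get_answer_encoding_spec : Claim_equal_get_answer_encoding := by
  intro text answer _
  simp only [Spec_get_answer_encoding, get_answer_encoding, get_answer_encoding_alt]
  set t := text.toList with ht
  set a := answer.toList with ha
  by_cases hm0 : a.length = 0
  · -- empty answer: A matches at index 0 with an empty window; both sides are all zeros
    rw [if_pos (Or.inl hm0)]
    rw [PySem.List.pyRange_one_cons (by omega), List.foldl_cons]
    rw [if_pos (by
      rw [show ((0 : Int) + (a.length : Int)) = (0 : Int) from by omega]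
      simp [PySem.List.slice, List.length_eq_zero_iff.mp hm0])]
    rw [pvFoldSome]
    simp [hm0, PySem.List.clampIdx]
  · by_cases hnm : t.length < a.length
    · -- answer longer than text: A's range is empty, both sides are all zeros
      rw [if_pos (Or.inr hnm)]
      rw [PySem.List.pyRange_one_eq_nil (by omega)]
      rfl
    · -- main case: 1 ≤ m ≤ n
      rw [if_neg (by omega)]
      have hA := pvFoldA t a (t.length + 1) 0 (by omega)
      simp only [Nat.cast_zero] at hA
      rw [hA]
      rw [show (PySem.List.slice t none (some ((a.length : Nat) : Int))).foldl pvRKStep 0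
            = ((t.drop 0).take a.length).foldl pvRKStep 0 from by
        rw [PySem.List.slice_to_natCast, List.drop_zero]]
      rw [pvRKLoop_eq_naive t a (by omega) (t.length + 1) 0 _ (by omega) rfl]
      cases hcase : pvNaive t a a.length t.length 0 with
      | none => rfl
      | some s =>
          have hs : s + a.length ≤ t.length :=
            pvNaive_le t a a.length t.length (t.length + 1) 0 s (by omega) hcase
          simp only [Option.map_some, Int.ofNat_eq_natCast]
          have hc1 : PySem.List.clampIdx (List.replicate t.length (0 : Int)).length (s : Int)
              = s := by
            rw [List.length_replicate, PySem.List.clampIdx_natCast]; omega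
          have hc2 : PySem.List.clampIdx (List.replicate t.length (0 : Int)).length
              ((s : Int) + (a.length : Int)) = s + a.length := by
            rw [show ((s : Int) + (a.length : Int)) = (((s + a.length : Nat)) : Int) from by
              push_cast; ring]
            rw [List.length_replicate, PySem.List.clampIdx_natCast]; omega
          rw [hc1, hc2, List.take_replicate, List.drop_replicate]
          rw [show min s t.length = s from by omega,
            show t.length - (s + a.length) = t.length - s - a.length from by omega]
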